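-- pv_equiv track=rewrite | github.com/AbstractEndeavors/abstract-ai | src/abstract_ai/ai_call_package/env_dir/api_key_retrieval.py | extract_consistent_chars
-- ===== SOURCE A (Python) =====
-- def get_exact_char(char, i, word):
--     if i < len(word) and word[i] == char:
--         return char
--     return None
--
-- def extract_consistent_chars(word, comp_word):
--     const_chars = []
--     current_seq = ""
--     for i, char in enumerate(comp_word):
--         exact_char = get_exact_char(char, i, word)
--         if exact_char:
--             current_seq += exact_char
--         else:
--             if current_seq:
--                 const_chars.append(current_seq)
--                 current_seq = ""
--     if current_seq:
--         const_chars.append(current_seq)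
--     return const_chars if const_chars else [""]
-- ===== SOURCE B (Python) =====
-- def extract_consistent_chars(word, comp_word):
--     SEP = '\x00'
--     marked = ''.join(c if i < len(word) and word[i] == c else SEP
--                      for i, c in enumerate(comp_word))
--     runs = [run for run in marked.split(SEP) if run]
--     return runs or ['']
-- ===== Notes on version B (the rewrite author's own statement) =====
-- stated objective: idiomatic
-- what changed: Replaces the stateful accumulator loop with mismatch-flush by a single marked string (matched chars kept, mismatches replaced by a sentinel) that is split on the sentinel and filtered, keeping the [''] fallback.
import Mathlib
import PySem

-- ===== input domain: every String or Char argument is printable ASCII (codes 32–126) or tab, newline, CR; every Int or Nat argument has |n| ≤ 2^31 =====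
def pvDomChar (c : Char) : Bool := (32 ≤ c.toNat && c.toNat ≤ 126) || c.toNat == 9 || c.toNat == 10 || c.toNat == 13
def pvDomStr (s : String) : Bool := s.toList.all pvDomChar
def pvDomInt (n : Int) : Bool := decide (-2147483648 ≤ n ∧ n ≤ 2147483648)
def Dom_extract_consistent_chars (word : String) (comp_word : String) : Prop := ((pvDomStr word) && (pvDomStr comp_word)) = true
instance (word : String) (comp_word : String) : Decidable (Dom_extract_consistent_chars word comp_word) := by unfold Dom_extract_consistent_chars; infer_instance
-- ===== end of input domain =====

-- B replaces A's stateful accumulator/flush loop by building a marked string once and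
-- splitting it on a sentinel (objective: idiomatic); return values agree on all of Dom.

-- ===== PORT A =====
def get_exact_char (char : Char) (i : Int) (word : String) : Option Char :=
  -- 'if i < len(word) and word[i] == char: return char; return None'
  if i < (word.toList.length : Int) ∧ PySem.Str.pyGet? word i = some char then some char
  else none

def extract_consistent_chars (word : String) (comp_word : String) : List String :=
  -- const_chars : List String, current_seq : List Char (a Python string built char by char)
  let st :=
    (PySem.List.enumerate comp_word.toList 0).foldl
      (fun (st : List String × List Char) (p : Int × Char) =>
        match get_exact_char p.2 p.1 word with
        | some ec => (st.1, st.2 ++ [ec])                         -- 'if exact_char:' (a 1-char string is always truthy)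
        | none => if st.2 ≠ [] then (st.1 ++ [String.mk st.2], ([] : List Char)) else st)
      ([], [])
  let const_chars := if st.2 ≠ [] then st.1 ++ [String.mk st.2] else st.1
  if const_chars ≠ [] then const_chars else [""]

-- ===== PORT B =====
def extract_consistent_chars_alt (word : String) (comp_word : String) : List String :=
  -- marked = ''.join(c if i < len(word) and word[i] == c else '\x00' for i, c in enumerate(comp_word))
  let marked : List Char :=
    (PySem.List.enumerate comp_word.toList 0).map
      (fun p => if p.1 < (word.toList.length : Int) ∧ PySem.Str.pyGet? word p.1 = some p.2
                then p.2 else '\x00')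
  -- Python str.split with a single-char separator keeps empty pieces: exactly List.splitOn
  let runs := ((marked.splitOn '\x00').filter (· ≠ [])).map String.mk
  if runs ≠ [] then runs else [""]

-- ===== PRECONDITION & SPEC =====
def Spec_extract_consistent_chars (word : String) (comp_word : String) (out : List String) : Prop := out = extract_consistent_chars_alt word comp_word
instance (word : String) (comp_word : String) (out : List String) : Decidable (Spec_extract_consistent_chars word comp_word out) := by unfold Spec_extract_consistent_chars; infer_instance

-- ===== CLAIM (what is proved, stated in full; the proofs are below) =====
def Claim_equal_extract_consistent_chars : Prop := ∀ (word : String) (comp_word : String), Dom_extract_consistent_chars word comp_word → Spec_extract_consistent_chars word comp_word (extract_consistent_chars word comp_word)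

-- ===== LEMMAS AND PROOFS =====

-- step of A's loop, rephrased over the marked character (the sentinel '\x00' marks a mismatch)
def pvStep (st : List String × List Char) (m : Char) : List String × List Char :=
  if m = '\x00' then (if st.2 ≠ [] then (st.1 ++ [String.mk st.2], ([] : List Char)) else st)
  else (st.1, st.2 ++ [m])

theorem pv_main (l : List Char) (acc : List String) (cur : List Char) :
    (if (l.foldl pvStep (acc, cur)).2 ≠ [] then
        (l.foldl pvStep (acc, cur)).1 ++ [String.mk (l.foldl pvStep (acc, cur)).2]
      else (l.foldl pvStep (acc, cur)).1)
    = acc ++ (((l.splitOn '\x00').modifyHead (cur ++ ·)).filter (· ≠ [])).map String.mk := by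
  simp only [List.splitOn]
  induction l generalizing acc cur with
  | nil =>
      simp only [List.foldl_nil, List.splitOnP_nil, List.modifyHead_cons, List.append_nil]
      by_cases h : cur = [] <;> simp [h, List.filter]
  | cons a l ih =>
      obtain ⟨g, gs, hg⟩ :=
        List.exists_cons_of_ne_nil (List.splitOnP_ne_nil (fun x => x == '\x00') l)
      rw [List.foldl_cons]
      by_cases ha : a = '\x00'
      · have hsplit : List.splitOnP (fun x => x == '\x00') (a :: l) = [] :: g :: gs := by
          rw [List.splitOnP_cons, if_pos (by simp [ha]), hg]
        rw [hsplit]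
        by_cases hc : cur = []
        · have h1 : pvStep (acc, cur) a = (acc, cur) := by
            simp [pvStep, ha, hc]
          rw [h1, ih acc cur, hg]
          simp [hc]
        · have h1 : pvStep (acc, cur) a = (acc ++ [String.mk cur], []) := by
            simp [pvStep, ha, hc]
          rw [h1, ih (acc ++ [String.mk cur]) [], hg]
          simp [hc, List.filter]
      · have hsplit : List.splitOnP (fun x => x == '\x00') (a :: l)
            = (a :: g) :: gs := by
          rw [List.splitOnP_cons, if_neg (by simp [ha]), hg, List.modifyHead_cons]
        rw [hsplit]
        have h1 : pvStep (acc, cur) a = (acc, cur ++ [a]) := by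
          simp [pvStep, ha]
        rw [h1, ih acc (cur ++ [a]), hg]
        simp

theorem pv_char_ne_sep (c : Char) (h : pvDomChar c = true) : c ≠ '\x00' := by
  intro hc
  subst hc
  simp [pvDomChar] at h

-- ===== VERDICT (by name: the statement is the Claim_ definition above) =====
theorem extract_consistent_chars_spec : Claim_equal_extract_consistent_chars := by
  intro word comp_word hdom
  unfold Spec_extract_consistent_chars
  simp only [Dom_extract_consistent_chars, Bool.and_eq_true] at hdom
  have hall : ∀ c ∈ comp_word.toList, c ≠ '\x00' := by
    intro c hc
    refine pv_char_ne_sep c ?_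
    have := hdom.2
    simp only [pvDomStr, List.all_eq_true] at this
    exact this c hc
  simp only [extract_consistent_chars, extract_consistent_chars_alt]
  have hfold :
      (PySem.List.enumerate comp_word.toList 0).foldl
        (fun (st : List String × List Char) (p : Int × Char) =>
          match get_exact_char p.2 p.1 word with
          | some ec => (st.1, st.2 ++ [ec])
          | none => if st.2 ≠ [] then (st.1 ++ [String.mk st.2], ([] : List Char)) else st)
        ([], [])
      = ((PySem.List.enumerate comp_word.toList 0).map
          (fun p => if p.1 < (word.toList.length : Int) ∧ PySem.Str.pyGet? word p.1 = some p.2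
                    then p.2 else '\x00')).foldl pvStep ([], []) := by
    rw [List.foldl_map]
    apply PySem.List.foldl_congr_mem
    intro st p hp
    have hp2 : p.2 ∈ comp_word.toList := by
      rw [PySem.List.mem_enumerate_iff] at hp
      obtain ⟨k, hk, rfl⟩ := hp
      simp
    have hne : p.2 ≠ '\x00' := hall _ hp2
    unfold get_exact_char
    by_cases hcond : p.1 < (word.toList.length : Int) ∧ PySem.Str.pyGet? word p.1 = some p.2
    · rw [if_pos hcond, if_pos hcond]
      simp only [pvStep, if_neg hne]
    · rw [if_neg hcond, if_neg hcond]
      simp [pvStep]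
  rw [hfold, pv_main]
  have hid : (fun x => ([] : List Char) ++ x) = id := by funext x; simp
  rw [hid, List.modifyHead_id, List.nil_append]
  simp only [id_eq]
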